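-- pv_equiv track=rewrite | github.com/TeamLab/lab_for_gachon_cs50 | ex_lab_x_queen/x_queen.py | check_row_culumn_extract_list
-- ===== SOURCE A (Python) =====
-- def check_row_culumn_extract_list(total_list):
--     # """
--     # Input:
--     # 	- 좌표로 만들어진 정수형 자료가 들어간 삼중리스트
--     #   - make_target_of_coordinates(변수) 함수의 결과값
--     # Output:
--     # 	- 한개의 리스트 안에서 반복되는 요소들이 사라진 이중리스트
--     #     부가설명
--     #        - input 으로 들어온 변수를 분석해보자면 이중리스트를 여러개가 모였는데 그 자체를 또 리스트로 감싸준 형태이다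
--     #           거기서 이중리스트는 한 경우의 케이스인데 예를 들어보겠다.
--     #            1. [[0, 0], [1, 1], [2, 2], [3, 3]] 는 Output으로 나와야 하는 함수이다.
--     #                 X O O O
--     #                 O X O O
--     #                 O O X O
--     #                 O O O X
--     #            2. [[0, 1], [1, 1], [2, 2], [3, 3]] 는 Output으로 나오면 안되는 함수이다.
--     #                 X O X X
--     #                 X O X X
--     #                 X O X X
--     #                 X O X X
--     #      부가설명2
--     #         - 이처럼 가로,세로에 한개의 체스판이 존재하는 케이스만 결과값으로 나오면 된다.
--     #   - 리스트의 각각의 요소는 정수형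
--     # Examples(python shell):
--     # 	>>> import x_queen as xq
--     # 	>>> value_1 = [[[0, 0], [1, 1], [2, 2], [3, 3]], [[0, 0], [1, 1], [2, 3], [3, 2]], [[0, 0], [1, 2], [2, 1], [3, 3]]
--     #   , [[0, 0], [1, 2], [2, 3], [3, 1]], [[0, 0], [1, 3], [2, 1], [3, 2]], [[0, 0], [1, 3], [2, 2], [3, 1]]
--     #   , [[0, 1], [1, 0], [2, 2], [3, 3]], [[0, 1], [1, 0], [2, 3], [3, 2]], [[0, 1], [1, 2], [2, 0], [3, 3]]
--     #   , [[0, 1], [1, 2], [2, 3], [3, 0]], [[0, 1], [1, 3], [2, 0], [3, 2]], [[0, 1], [1, 3], [2, 2], [3, 0]]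
--     #   , [[0, 2], [1, 0], [2, 1], [3, 3]], [[0, 2], [1, 0], [2, 3], [3, 1]], [[0, 2], [1, 1], [2, 0], [3, 3]]
--     #   , [[0, 2], [1, 1], [2, 3], [3, 0]], [[0, 2], [1, 3], [2, 0], [3, 1]], [[0, 2], [1, 3], [2, 1], [3, 0]]
--     #   , [[0, 3], [1, 0], [2, 1], [3, 2]], [[0, 3], [1, 0], [2, 2], [3, 1]], [[0, 3], [1, 1], [2, 0], [3, 2]]
--     #   , [[0, 3], [1, 1], [2, 2], [3, 0]], [[0, 3], [1, 2], [2, 0], [3, 1]], [[0, 3], [1, 2], [2, 1], [3, 0]]]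
--     # 	>>> xq.check_row_culumn_extract_list(value_1)
--     #   [[0, 1, 2, 3], [0, 1, 3, 2], [0, 2, 1, 3], [0, 2, 3, 1], [0, 3, 1, 2], [0, 3, 2, 1], [1, 0, 2, 3]
--     #   , [1, 0, 3, 2], [1, 2, 0, 3], [1, 2, 3, 0], [1, 3, 0, 2], [1, 3, 2, 0], [2, 0, 1, 3], [2, 0, 3, 1]
--     #   , [2, 1, 0, 3], [2, 1, 3, 0], [2, 3, 0, 1], [2, 3, 1, 0], [3, 0, 1, 2], [3, 0, 2, 1], [3, 1, 0, 2], [3, 1, 2, 0]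
--     #   , [3, 2, 0, 1], [3, 2, 1, 0]]
--     #   >>> value_2 = [[[0, 1], [1, 2], [2, 4], [3, 7]], [[0, 1], [1, 2], [2, 7], [3, 4]], [[0, 1], [1, 4], [2, 2], [3, 7]]
--     #   , [[0, 1], [1, 4], [2, 7], [3, 2]], [[0, 1], [1, 7], [2, 2], [3, 4]], [[0, 1], [1, 7], [2, 4], [3, 2]]
--     #   , [[0, 2], [1, 1], [2, 4], [3, 7]], [[0, 2], [1, 1], [2, 7], [3, 4]], [[0, 2], [1, 4], [2, 1], [3, 7]]
--     #   , [[0, 2], [1, 4], [2, 7], [3, 1]], [[0, 2], [1, 7], [2, 1], [3, 4]], [[0, 2], [1, 7], [2, 4], [3, 1]]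
--     #   , [[0, 4], [1, 1], [2, 2], [3, 7]], [[0, 4], [1, 1], [2, 7], [3, 2]], [[0, 4], [1, 2], [2, 1], [3, 7]]
--     #   , [[0, 4], [1, 2], [2, 7], [3, 1]], [[0, 4], [1, 7], [2, 1], [3, 2]], [[0, 4], [1, 7], [2, 2], [3, 1]]
--     #   , [[0, 7], [1, 1], [2, 2], [3, 4]], [[0, 7], [1, 1], [2, 4], [3, 2]], [[0, 7], [1, 2], [2, 1], [3, 4]]
--     #   , [[0, 7], [1, 2], [2, 4], [3, 1]], [[0, 7], [1, 4], [2, 1], [3, 2]], [[0, 7], [1, 4], [2, 2], [3, 1]]]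
--     # 	>>> xq.check_row_culumn_extract_list(value_2)
--     #   [[1, 2, 4, 7], [1, 2, 7, 4], [1, 4, 2, 7], [1, 4, 7, 2], [1, 7, 2, 4], [1, 7, 4, 2], [2, 1, 4, 7]
--     #   , [2, 1, 7, 4], [2, 4, 1, 7], [2, 4, 7, 1], [2, 7, 1, 4], [2, 7, 4, 1], [4, 1, 2, 7], [4, 1, 7, 2], [4, 2, 1, 7]
--     #   , [4, 2, 7, 1], [4, 7, 1, 2], [4, 7, 2, 1], [7, 1, 2, 4], [7, 1, 4, 2], [7, 2, 1, 4], [7, 2, 4, 1], [7, 4, 1, 2]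
--     #   , [7, 4, 2, 1]]
--     # """
--     result_row = []
--     result_column = []
--     return_result = []
--     for index_1 in range(len(total_list)):
--         check_result_row = []
--         check_result_column = []
--         for index_2 in range(len(total_list[0])):
--             check_result_row.append(total_list[index_1][index_2][0])
--             check_result_column.append(total_list[index_1][index_2][1])
--         if len(set(check_result_row)) == len(total_list[0]) and len(set(check_result_column)) == len(total_list[0]):
--             result_row += check_result_row
--             result_column += check_result_column
--     two_mention_index = 0
--     for result_column_index in range(len(result_column)):
--         if result_column_index == 0:
--             return_result.append([])
--             return_result[two_mention_index].append(result_column[result_column_index])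
--         elif result_column_index % len(total_list[0]) ==0:
--             two_mention_index += 1
--             return_result.append([])
--             return_result[two_mention_index].append(result_column[result_column_index])
--         else:
--             return_result[two_mention_index].append(result_column[result_column_index])
--     return return_result
-- ===== SOURCE B (Python) =====
-- def check_row_culumn_extract_list(total_list):
--     if not total_list:
--         return []
--     n = len(total_list[0])
--     result = []
--     for case in total_list:
--         chunk = case[:n]
--         rows = [p[0] for p in chunk]
--         cols = [p[1] for p in chunk]
--         if len(set(rows)) == n and len(set(cols)) == n:
--             result.append(cols)
--     return result
-- ===== Notes on version B (the rewrite author's own statement) =====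
-- stated objective: simpler
-- what changed: B builds the grouped output directly in one pass (append the column list of each accepted case), removing A's flat result_column accumulation and its whole second modulo-based re-chunking loop.
-- outside the precondition, e.g. on check_row_culumn_extract_list([[]]): A returns [], B returns [[]]; on check_row_culumn_extract_list([[], [[0, 0]]]): A returns [], B returns [[], []]
import Mathlib
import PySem

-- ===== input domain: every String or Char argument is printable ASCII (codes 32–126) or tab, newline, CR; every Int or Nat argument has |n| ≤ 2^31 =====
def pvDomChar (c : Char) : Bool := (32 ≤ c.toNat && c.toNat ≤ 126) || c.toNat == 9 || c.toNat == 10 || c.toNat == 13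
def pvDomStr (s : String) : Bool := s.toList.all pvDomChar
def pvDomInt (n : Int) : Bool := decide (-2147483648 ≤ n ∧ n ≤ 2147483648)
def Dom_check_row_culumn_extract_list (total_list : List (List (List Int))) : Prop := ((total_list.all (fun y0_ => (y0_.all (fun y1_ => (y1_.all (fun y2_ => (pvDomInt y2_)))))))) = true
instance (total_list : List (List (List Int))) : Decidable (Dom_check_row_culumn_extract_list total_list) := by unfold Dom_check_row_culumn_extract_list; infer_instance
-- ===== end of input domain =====

-- B builds the grouped output directly in one pass, removing A's flat result_column
-- accumulation and its whole second modulo-based re-chunking loop (objective: simpler).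

-- ===== PORT A =====
-- A-side helper: one iteration of A's second (re-chunking) loop; return_result[two_mention_index].append(x)
-- is ported as pyGetD/pySetD (the index is in range on every iteration the Python actually performs).
def pvChunkStep (n : Nat) (st : Int × List (List Int)) (idx : Int) (x : Int) : Int × List (List Int) :=
  if idx = 0 then
    let rr := st.2 ++ [[]]
    (st.1, PySem.List.pySetD rr st.1 (PySem.List.pyGetD rr st.1 [] ++ [x]))
  else if PySem.Int.mod idx (n : Int) = 0 then
    let t := st.1 + 1
    let rr := st.2 ++ [[]]
    (t, PySem.List.pySetD rr t (PySem.List.pyGetD rr t [] ++ [x]))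
  else
    (st.1, PySem.List.pySetD st.2 st.1 (PySem.List.pyGetD st.2 st.1 [] ++ [x]))

def check_row_culumn_extract_list (total_list : List (List (List Int))) : List (List Int) :=
  let rowcol :=
    (PySem.List.pyRange 0 (total_list.length : Int) 1).foldl
      (fun (acc : List Int × List Int) i1 =>
        let p :=
          (PySem.List.pyRange 0 ((PySem.List.pyGetD total_list 0 []).length : Int) 1).foldl
            (fun (q : List Int × List Int) i2 =>
              (q.1 ++ [PySem.List.pyGetD (PySem.List.pyGetD (PySem.List.pyGetD total_list i1 []) i2 []) 0 0],
               q.2 ++ [PySem.List.pyGetD (PySem.List.pyGetD (PySem.List.pyGetD total_list i1 []) i2 []) 1 0]))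
            ([], [])
        if (PySem.Set.ofList p.1).length = (PySem.List.pyGetD total_list 0 []).length ∧
           (PySem.Set.ofList p.2).length = (PySem.List.pyGetD total_list 0 []).length
        then (acc.1 ++ p.1, acc.2 ++ p.2) else acc)
      ([], [])
  let rc := rowcol.2
  ((PySem.List.pyRange 0 (rc.length : Int) 1).foldl
     (fun st idx => pvChunkStep (PySem.List.pyGetD total_list 0 []).length st idx (PySem.List.pyGetD rc idx 0))
     ((0 : Int), ([] : List (List Int)))).2

-- ===== PORT B =====
def check_row_culumn_extract_list_alt (total_list : List (List (List Int))) : List (List Int) :=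
  match total_list with
  | [] => []
  | c0 :: _ =>
    let n := c0.length
    total_list.foldl
      (fun acc case =>
        let chunk := case.take n           -- case[:n] with 0 ≤ n is List.take n
        let rows := chunk.map (fun p => PySem.List.pyGetD p 0 0)
        let cols := chunk.map (fun p => PySem.List.pyGetD p 1 0)
        if (PySem.Set.ofList rows).length = n ∧ (PySem.Set.ofList cols).length = n
        then acc ++ [cols] else acc)
      []

-- ===== PRECONDITION & SPEC =====
-- Pre_ excludes (a) inputs on which A raises IndexError: a case shorter than the first case, or a
-- coordinate of length < 2 among the first n entries of a case; and (b) nonempty inputs whose first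
-- case is empty (n = 0), where A's re-chunking pass collapses the accepted empty column groups to []
-- while B keeps one empty group per accepted case — both groupings of zero-length chunks are accidental.
def Pre_check_row_culumn_extract_list (total_list : List (List (List Int))) : Prop :=
  total_list = [] ∨
    (0 < (total_list.headD []).length ∧
      ∀ case ∈ total_list, (total_list.headD []).length ≤ case.length ∧
        ∀ p ∈ case.take (total_list.headD []).length, 2 ≤ p.length)
instance (total_list : List (List (List Int))) : Decidable (Pre_check_row_culumn_extract_list total_list) := by unfold Pre_check_row_culumn_extract_list; infer_instance

def pvWitness_check_row_culumn_extract_list : List (List (List Int)) :=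
  [[[0, 0], [1, 1]], [[0, 1], [1, 0]]]

def Spec_check_row_culumn_extract_list (total_list : List (List (List Int))) (out : List (List Int)) : Prop := out = check_row_culumn_extract_list_alt total_list
instance (total_list : List (List (List Int))) (out : List (List Int)) : Decidable (Spec_check_row_culumn_extract_list total_list out) := by unfold Spec_check_row_culumn_extract_list; infer_instance

-- ===== CLAIM (what is proved, stated in full; the proofs are below) =====
def Claim_equal_check_row_culumn_extract_list : Prop := ∀ (total_list : List (List (List Int))), Dom_check_row_culumn_extract_list total_list → Pre_check_row_culumn_extract_list total_list → Spec_check_row_culumn_extract_list total_list (check_row_culumn_extract_list total_list)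

-- ===== LEMMAS AND PROOFS =====

-- the row/column lists A and B both extract from one case (first n coordinates)
def pvRowsOf (n : Nat) (case : List (List Int)) : List Int :=
  (case.take n).map (fun p => PySem.List.pyGetD p 0 0)
def pvColsOf (n : Nat) (case : List (List Int)) : List Int :=
  (case.take n).map (fun p => PySem.List.pyGetD p 1 0)

theorem pv_map_range_take {β : Type} (case : List (List Int)) (n : Nat) (h : n ≤ case.length)
    (g : List Int → β) :
    (PySem.List.pyRange 0 (n : Int) 1).map (fun i => g (PySem.List.pyGetD case i [])) =
      (case.take n).map g := by
  rw [PySem.List.pyRange_zero_nat, List.map_map]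
  apply List.ext_getElem
  · simp [Nat.min_eq_left h]
  · intro i h1 h2
    simp only [List.getElem_map, List.getElem_range, Function.comp_apply,
      PySem.List.pyGetD_natCast, List.getElem_take]
    rw [List.getD_eq_getElem]

theorem pv_getD_append_len (l : List (List Int)) (x : List Int) :
    (l ++ [x]).getD l.length [] = x := by
  simp [List.getD_eq_getElem?_getD]

theorem pv_set_append_len (l : List (List Int)) (x v : List Int) :
    (l ++ [x]).set l.length v = l ++ [v] := by
  simp [List.set_append_right]

theorem pv_chunk_tail (n : Nat) (xs : List Int) : ∀ (j q : Nat) (front : List (List Int)) (last : List Int),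
    1 ≤ j → j + xs.length ≤ n → front.length = q →
    (PySem.List.enumerate xs ((q * n + j : Nat) : Int)).foldl
        (fun st p => pvChunkStep n st p.1 p.2) ((q : Int), front ++ [last]) =
      ((q : Int), front ++ [last ++ xs]) := by
  induction xs with
  | nil => intro j q front last h1 h2 h3; simp
  | cons x xs ih =>
    intro j q front last h1 h2 h3
    rw [PySem.List.enumerate_cons, List.foldl_cons]
    have hstep : pvChunkStep n ((q : Int), front ++ [last]) ((q * n + j : Nat) : Int) x
        = ((q : Int), front ++ [last ++ [x]]) := by
      have hne0 : ((q * n + j : Nat) : Int) ≠ 0 := by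
        exact Nat.cast_ne_zero.mpr (by omega)
      have hmod : PySem.Int.mod ((q * n + j : Nat) : Int) (n : Int) ≠ 0 := by
        rw [PySem.Int.mod_natCast]
        have hj : (q * n + j) % n = j := by
          rw [Nat.add_comm, Nat.add_mul_mod_self_right, Nat.mod_eq_of_lt (by simp at h2; omega)]
        rw [hj]
        exact Nat.cast_ne_zero.mpr (by omega)
      simp only [pvChunkStep, if_neg hne0, if_neg hmod]
      rw [← h3, PySem.List.pyGetD_natCast, PySem.List.pySetD_natCast,
        pv_getD_append_len, pv_set_append_len]
    rw [hstep]
    have hcast : ((q * n + j : Nat) : Int) + 1 = ((q * n + (j + 1) : Nat) : Int) := by push_cast; ring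
    rw [hcast, ih (j + 1) q front (last ++ [x]) (by omega) (by simp at h2 ⊢; omega) h3]
    simp

theorem pv_chunk_main (n : Nat) (hn : 0 < n) : ∀ (gs : List (List Int)) (q : Nat) (t : Int) (rr : List (List Int)),
    (∀ g ∈ gs, g.length = n) → rr.length = q →
    (q = 0 → t = 0 ∧ rr = []) → (0 < q → t = (q : Int) - 1) →
    ((PySem.List.enumerate gs.flatten ((q * n : Nat) : Int)).foldl
        (fun st p => pvChunkStep n st p.1 p.2) (t, rr)).2 = rr ++ gs := by
  intro gs
  induction gs with
  | nil => intro q t rr _ _ _ _; simp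
  | cons g gs ih =>
    intro q t rr hlen hrr hq0 hqpos
    have hg : g.length = n := hlen g (by exact List.mem_cons_self ..)
    obtain ⟨g0, gt, rfl⟩ : ∃ g0 gt, g = g0 :: gt := by
      cases g with
      | nil => simp at hg; omega
      | cons a b => exact ⟨a, b, rfl⟩
    rw [List.flatten_cons, PySem.List.enumerate_append, List.foldl_append]
    rw [PySem.List.enumerate_cons, List.foldl_cons]
    have hstep : pvChunkStep n (t, rr) ((q * n : Nat) : Int) g0 = ((q : Int), rr ++ [[g0]]) := by
      by_cases hq : q = 0
      · obtain ⟨ht, hrrnil⟩ := hq0 hq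
        subst ht hrrnil hq
        simp only [pvChunkStep, Nat.zero_mul, Nat.cast_zero]
        norm_num [PySem.List.pySetD_of_nonneg, PySem.List.pyGetD_ofNat']
      · have hqpos' := hqpos (by omega)
        have hne0 : ((q * n : Nat) : Int) ≠ 0 := Nat.cast_ne_zero.mpr (by positivity)
        have hmod : PySem.Int.mod ((q * n : Nat) : Int) (n : Int) = 0 := by
          rw [PySem.Int.mod_natCast, Nat.mul_mod_left]; simp
        simp only [pvChunkStep, if_neg hne0, if_pos hmod]
        rw [hqpos']
        have : ((q : Int) - 1) + 1 = ((q : Nat) : Int) := by ring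
        rw [this, PySem.List.pyGetD_natCast, PySem.List.pySetD_natCast, ← hrr,
          pv_getD_append_len, pv_set_append_len]
        simp
    rw [hstep]
    have hc1 : ((q * n : Nat) : Int) + 1 = ((q * n + 1 : Nat) : Int) := by push_cast; ring
    rw [hc1, pv_chunk_tail n gt 1 q rr [g0] (by omega) (by simp at hg; omega) hrr]
    have hc2 : ((q * n : Nat) : Int) + ((g0 :: gt).length : Int) = (((q + 1) * n : Nat) : Int) := by
      rw [hg]; push_cast; ring
    rw [hc2, List.singleton_append,
      ih (q + 1) ((q : Int)) (rr ++ [g0 :: gt]) (fun g hgm => hlen g (by simp [hgm]))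
        (by simp [hrr]) (by omega) (fun _ => by push_cast; ring)]
    simp

-- ===== VERDICT (by name: the statement is the Claim_ definition above) =====
theorem check_row_culumn_extract_list_spec : Claim_equal_check_row_culumn_extract_list := by
  intro tl _ hpre
  unfold Spec_check_row_culumn_extract_list
  cases tl with
  | nil => rfl
  | cons c0 rest =>
    rcases hpre with h | ⟨hn, hcase⟩
    · simp at h
    simp only [List.headD_cons] at hn hcase
    have h0 : PySem.List.pyGetD (c0 :: rest) 0 [] = c0 := by
      have h := PySem.List.pyGetD_natCast (c0 :: rest) 0 []
      rw [Nat.cast_zero] at h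
      rw [h]
      rfl
    -- B side: one-pass fold = filter-then-map normal form
    have hB : check_row_culumn_extract_list_alt (c0 :: rest) =
        ((c0 :: rest).filter (fun case =>
          decide ((PySem.Set.ofList (pvRowsOf c0.length case)).length = c0.length ∧
                  (PySem.Set.ofList (pvColsOf c0.length case)).length = c0.length))).map
          (pvColsOf c0.length) := by
      simp only [check_row_culumn_extract_list_alt, pvRowsOf, pvColsOf]
      rw [PySem.List.foldl_append_ite]
      simp [pvColsOf, List.map_take]
    rw [hB]
    simp only [check_row_culumn_extract_list, h0]
    rw [PySem.List.foldl_pyRange_zero_pyGetD' (c0 :: rest) []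
      (fun (acc : List Int × List Int) case =>
        let p :=
          (PySem.List.pyRange 0 (c0.length : Int) 1).foldl
            (fun (q : List Int × List Int) i2 =>
              (q.1 ++ [PySem.List.pyGetD (PySem.List.pyGetD case i2 []) 0 0],
               q.2 ++ [PySem.List.pyGetD (PySem.List.pyGetD case i2 []) 1 0]))
            ([], [])
        if (PySem.Set.ofList p.1).length = c0.length ∧
           (PySem.Set.ofList p.2).length = c0.length
        then (acc.1 ++ p.1, acc.2 ++ p.2) else acc)
      ([], [])]
    rw [PySem.List.foldl_congr_mem (c0 :: rest) _
      (fun (acc : List Int × List Int) case =>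
        ((if (PySem.Set.ofList (pvRowsOf c0.length case)).length = c0.length ∧
             (PySem.Set.ofList (pvColsOf c0.length case)).length = c0.length
          then acc.1 ++ pvRowsOf c0.length case else acc.1),
         (if (PySem.Set.ofList (pvRowsOf c0.length case)).length = c0.length ∧
             (PySem.Set.ofList (pvColsOf c0.length case)).length = c0.length
          then acc.2 ++ pvColsOf c0.length case else acc.2)))
      ([], [])
      (by
        intro acc case hmem
        have hle : c0.length ≤ case.length := (hcase case hmem).1
        have hp : (PySem.List.pyRange 0 (c0.length : Int) 1).foldl
            (fun (q : List Int × List Int) i2 =>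
              (q.1 ++ [PySem.List.pyGetD (PySem.List.pyGetD case i2 []) 0 0],
               q.2 ++ [PySem.List.pyGetD (PySem.List.pyGetD case i2 []) 1 0]))
            ([], []) = (pvRowsOf c0.length case, pvColsOf c0.length case) := by
          rw [PySem.List.foldl_prod_mk
            (f := fun s i2 => s ++ [PySem.List.pyGetD (PySem.List.pyGetD case i2 []) 0 0])
            (g := fun s i2 => s ++ [PySem.List.pyGetD (PySem.List.pyGetD case i2 []) 1 0])]
          rw [PySem.List.foldl_append_singleton_eq_map, PySem.List.foldl_append_singleton_eq_map,
            List.nil_append, List.nil_append,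
            pv_map_range_take case c0.length hle (fun c => PySem.List.pyGetD c 0 0),
            pv_map_range_take case c0.length hle (fun c => PySem.List.pyGetD c 1 0)]
          rfl
        simp only [hp]
        split_ifs <;> rfl)]
    rw [PySem.List.foldl_prod_mk
      (f := fun (a : List Int) case =>
        if (PySem.Set.ofList (pvRowsOf c0.length case)).length = c0.length ∧
           (PySem.Set.ofList (pvColsOf c0.length case)).length = c0.length
        then a ++ pvRowsOf c0.length case else a)
      (g := fun (a : List Int) case =>
        if (PySem.Set.ofList (pvRowsOf c0.length case)).length = c0.length ∧
           (PySem.Set.ofList (pvColsOf c0.length case)).length = c0.length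
        then a ++ pvColsOf c0.length case else a)]
    dsimp only
    rw [PySem.List.foldl_ite_eq_foldl_filter, PySem.List.foldl_append_eq_flatMap,
      List.nil_append, List.flatMap_def]
    set gs := ((c0 :: rest).filter (fun case =>
      decide ((PySem.Set.ofList (pvRowsOf c0.length case)).length = c0.length ∧
              (PySem.Set.ofList (pvColsOf c0.length case)).length = c0.length))).map
      (pvColsOf c0.length) with hgs
    have hlens : ∀ g ∈ gs, g.length = c0.length := by
      rw [hgs]
      intro g hg
      obtain ⟨case, hc, rfl⟩ := List.mem_map.mp hg
      have hmem := List.mem_of_mem_filter hc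
      have hle := (hcase case hmem).1
      simp [pvColsOf, Nat.min_eq_left hle]
    have hfinal := pv_chunk_main c0.length hn gs 0 0 [] hlens rfl
      (fun _ => ⟨rfl, rfl⟩) (fun h => absurd h (by omega))
    simp only [Nat.zero_mul, Nat.cast_zero, List.nil_append] at hfinal
    rw [PySem.List.enumerate_eq_map_pyRange gs.flatten 0, List.foldl_map,
      PySem.List.len_eq] at hfinal
    exact hfinal
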